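-- pv_equiv track=rewrite | github.com/OR-Dept-Environmental-Quality/TTools | Step5_Sample_Landcover_PointMethod_Array_v2.py | create_block_list
-- ===== SOURCE A (Python) =====
-- def create_block_list(lc_pointList, block_size):
--
--     x_coord_list = [i[0] for i in lc_pointList]
--     y_coord_list = [i[1] for i in lc_pointList]
--
--     # calculate the buffer distance (in raster spatial units) to add to
--     # the raster bounding box when extracting to an array
--     buffer = 0
--
--     # calculate bounding box extent for samples
--     x_min = min(x_coord_list)
--     x_max = max(x_coord_list)
--     y_min = min(y_coord_list)
--     y_max = max(y_coord_list)
--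
--     x_width = int(x_max - x_min + 1)
--     y_width = int(y_max - y_min + 1)
--
--     block_extents = []
--     block_points = []
--
--     # Build data blocks
--     for x in range(0, x_width, block_size):
--         for y in range(0, y_width, block_size):
--
--             # Lower left coordinate of block (in map units)
--             block_x_min = min([x_min + x, x_max])
--             block_y_min = min([y_min + y, y_max])
--             # Upper right coordinate of block (in map units)
--             block_x_max = min([block_x_min + block_size, x_max])
--             block_y_max = min([block_y_min + block_size, y_max])
--
--             samples_in_block = []
--             for sample in lc_pointList:
--                 if block_x_min <= sample[0] <= block_x_max and block_y_min <= sample[1] <= block_y_max: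
--                     samples_in_block.append(sample)
--
--             if samples_in_block:
--                 # order is left, bottom, right, top
--                 block_extents.append([block_x_min - buffer, block_y_min - buffer,
--                                       block_x_max + buffer, block_y_max - + buffer])
--                 # 0 left,      1 bottom,    2 right,     3 top
--                 # block_x_min, block_y_min, block_x_max, block_y_max, ncols, nrows
--                 block_points.append(samples_in_block)
--
--     return block_extents, block_points
-- ===== SOURCE B (Python) =====
-- def _block_indices(d, bs):
--     # indices i with i*bs <= d <= i*bs + bs and i >= 0
--     q, r = divmod(d, bs)
--     if r == 0 and q >= 1:
--         return [q - 1, q]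
--     return [q]
--
--
-- def create_block_list(lc_pointList, block_size):
--     x_min = min(p[0] for p in lc_pointList)
--     x_max = max(p[0] for p in lc_pointList)
--     y_min = min(p[1] for p in lc_pointList)
--     y_max = max(p[1] for p in lc_pointList)
--
--     # hash each point to its (at most four) containing block keys
--     keys = set()
--     for p in lc_pointList:
--         for ix in _block_indices(p[0] - x_min, block_size):
--             for iy in _block_indices(p[1] - y_min, block_size):
--                 keys.add((ix, iy))
--
--     block_extents = []
--     block_points = []
--     for ix, iy in sorted(keys):
--         bx = x_min + ix * block_size
--         by = y_min + iy * block_size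
--         bx2 = min(bx + block_size, x_max)
--         by2 = min(by + block_size, y_max)
--         block_extents.append([bx, by, bx2, by2])
--         block_points.append([p for p in lc_pointList
--                              if bx <= p[0] <= bx2 and by <= p[1] <= by2])
--     return block_extents, block_points
-- ===== Notes on version B (the rewrite author's own statement) =====
-- stated objective: alternative
-- what changed: Instead of scanning every grid block of the bounding box and testing all points per block, B hashes each point to its at most four containing block keys in one pass, then emits the sorted non-empty keys only, gathering each block's points with one filter per non-empty block.
-- outside the precondition, e.g. on create_block_list([[0, 0]], -1): A returns ([], []), B returns ([[0, 0, -1, -1]], [[]])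
import Mathlib
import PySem

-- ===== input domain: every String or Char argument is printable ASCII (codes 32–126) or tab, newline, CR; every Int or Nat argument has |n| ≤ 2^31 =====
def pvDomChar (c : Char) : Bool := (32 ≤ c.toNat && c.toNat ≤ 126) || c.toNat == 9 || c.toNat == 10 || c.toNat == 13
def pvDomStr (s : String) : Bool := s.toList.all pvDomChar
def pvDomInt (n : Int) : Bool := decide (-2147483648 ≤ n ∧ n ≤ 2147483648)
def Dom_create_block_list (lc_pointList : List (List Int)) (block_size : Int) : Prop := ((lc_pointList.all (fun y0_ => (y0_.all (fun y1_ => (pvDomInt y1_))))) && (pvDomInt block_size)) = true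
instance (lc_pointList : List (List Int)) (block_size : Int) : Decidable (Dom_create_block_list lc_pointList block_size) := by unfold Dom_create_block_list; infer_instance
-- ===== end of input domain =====

-- B hashes each point to its (at most four) containing block keys and emits the sorted non-empty
-- blocks, instead of A's scan of every grid block; same return value, no side effects in either.

-- ===== PORT A =====
-- Python min([a, b]) on a two-element int list is ported as `min a b` (exact for ints).
def create_block_list (lc_pointList : List (List Int)) (block_size : Int) : List (List Int) × List (List (List Int)) :=
  let x_coord_list := lc_pointList.map (fun i => PySem.List.pyGetD i 0 0)
  let y_coord_list := lc_pointList.map (fun i => PySem.List.pyGetD i 1 0)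
  let buffer : Int := 0
  let x_min := (PySem.List.min? x_coord_list (fun v => v)).getD 0
  let x_max := (PySem.List.max? x_coord_list (fun v => v)).getD 0
  let y_min := (PySem.List.min? y_coord_list (fun v => v)).getD 0
  let y_max := (PySem.List.max? y_coord_list (fun v => v)).getD 0
  let x_width := x_max - x_min + 1
  let y_width := y_max - y_min + 1
  (PySem.List.pyRange 0 x_width block_size).foldl (fun acc x =>
    (PySem.List.pyRange 0 y_width block_size).foldl (fun acc y =>
      let block_x_min := min (x_min + x) x_max
      let block_y_min := min (y_min + y) y_max
      let block_x_max := min (block_x_min + block_size) x_max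
      let block_y_max := min (block_y_min + block_size) y_max
      let samples_in_block := lc_pointList.foldl (fun sib sample =>
        if (block_x_min ≤ PySem.List.pyGetD sample 0 0 ∧ PySem.List.pyGetD sample 0 0 ≤ block_x_max) ∧
           (block_y_min ≤ PySem.List.pyGetD sample 1 0 ∧ PySem.List.pyGetD sample 1 0 ≤ block_y_max)
        then sib ++ [sample] else sib) []
      if samples_in_block ≠ [] then
        (acc.1 ++ [[block_x_min - buffer, block_y_min - buffer, block_x_max + buffer, block_y_max - buffer]],
         acc.2 ++ [samples_in_block])
      else acc) acc)
    (([] : List (List Int)), ([] : List (List (List Int))))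

-- ===== PORT B =====
-- _block_indices(d, bs): indices i with i*bs <= d <= i*bs + bs and i >= 0
def blockIndices (d bs : Int) : List Int :=
  let q := PySem.Int.floordiv d bs
  let r := PySem.Int.mod d bs
  if r = 0 ∧ 1 ≤ q then [q - 1, q] else [q]

def create_block_list_alt (lc_pointList : List (List Int)) (block_size : Int) : List (List Int) × List (List (List Int)) :=
  let x_min := (PySem.List.min? (lc_pointList.map (fun i => PySem.List.pyGetD i 0 0)) (fun v => v)).getD 0
  let x_max := (PySem.List.max? (lc_pointList.map (fun i => PySem.List.pyGetD i 0 0)) (fun v => v)).getD 0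
  let y_min := (PySem.List.min? (lc_pointList.map (fun i => PySem.List.pyGetD i 1 0)) (fun v => v)).getD 0
  let y_max := (PySem.List.max? (lc_pointList.map (fun i => PySem.List.pyGetD i 1 0)) (fun v => v)).getD 0
  let keys := lc_pointList.foldl (fun ks p =>
      (blockIndices (PySem.List.pyGetD p 0 0 - x_min) block_size).foldl (fun ks ix =>
        (blockIndices (PySem.List.pyGetD p 1 0 - y_min) block_size).foldl (fun ks iy =>
          PySem.Set.add ks (ix, iy)) ks) ks)
    (PySem.Set.empty : PySem.Set (Int × Int))
  (PySem.List.sorted2 keys Prod.fst Prod.snd).foldl (fun acc k =>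
    let bx := x_min + k.1 * block_size
    let byy := y_min + k.2 * block_size
    let bx2 := min (bx + block_size) x_max
    let by2 := min (byy + block_size) y_max
    (acc.1 ++ [[bx, byy, bx2, by2]],
     acc.2 ++ [lc_pointList.filter (fun p => decide ((bx ≤ PySem.List.pyGetD p 0 0 ∧ PySem.List.pyGetD p 0 0 ≤ bx2) ∧
                                                     (byy ≤ PySem.List.pyGetD p 1 0 ∧ PySem.List.pyGetD p 1 0 ≤ by2)))]))
    (([] : List (List Int)), ([] : List (List (List Int))))

-- ===== PRECONDITION & SPEC =====
-- Pre_ excludes: the empty list and rows shorter than 2 (Python A raises ValueError/IndexError there),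
-- block_size = 0 (range() raises ValueError), and block_size < 0, which is outside the task's natural
-- domain (A's empty result there is only an accident of range() with a negative step).
def Pre_create_block_list (lc_pointList : List (List Int)) (block_size : Int) : Prop :=
  lc_pointList ≠ [] ∧ (∀ p ∈ lc_pointList, 2 ≤ p.length) ∧ 1 ≤ block_size
instance (lc_pointList : List (List Int)) (block_size : Int) : Decidable (Pre_create_block_list lc_pointList block_size) := by
  unfold Pre_create_block_list; infer_instance

def pvWitness_create_block_list : List (List Int) × Int := ([[0, 0], [3, 1]], 2)

def Spec_create_block_list (lc_pointList : List (List Int)) (block_size : Int) (out : List (List Int) × List (List (List Int))) : Prop := out = create_block_list_alt lc_pointList block_size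
instance (lc_pointList : List (List Int)) (block_size : Int) (out : List (List Int) × List (List (List Int))) : Decidable (Spec_create_block_list lc_pointList block_size out) := by unfold Spec_create_block_list; infer_instance

-- ===== CLAIM (what is proved, stated in full; the proofs are below) =====
def Claim_equal_create_block_list : Prop := ∀ (lc_pointList : List (List Int)) (block_size : Int), Dom_create_block_list lc_pointList block_size → Pre_create_block_list lc_pointList block_size → Spec_create_block_list lc_pointList block_size (create_block_list lc_pointList block_size)

-- ===== LEMMAS AND PROOFS =====

-- lexicographic order on pairs (Python tuple comparison)
def pvLexLe (a b : Int × Int) : Prop := a.1 < b.1 ∨ (a.1 = b.1 ∧ a.2 ≤ b.2)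
def pvLexLt (a b : Int × Int) : Prop := a.1 < b.1 ∨ (a.1 = b.1 ∧ a.2 < b.2)
def pvB (a b : Int × Int) : Bool := decide (a.1 < b.1) || (!decide (b.1 < a.1) && decide (a.2 < b.2))

lemma pvB_iff (a b : Int × Int) : pvB a b = true ↔ pvLexLt a b := by
  simp [pvB, pvLexLt]; omega

lemma pvLexLe_antisymm (a b : Int × Int) (h1 : pvLexLe a b) (h2 : pvLexLe b a) : a = b := by
  rcases a with ⟨a1, a2⟩; rcases b with ⟨b1, b2⟩
  simp [pvLexLe] at h1 h2; ext <;> simp <;> omega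

lemma pvLexLt_le (a b : Int × Int) (h : pvLexLt a b) : pvLexLe a b := by
  rcases h with h | ⟨h1, h2⟩
  · exact Or.inl h
  · exact Or.inr ⟨h1, le_of_lt h2⟩

lemma pvLexLe_trans (a b c : Int × Int) (h1 : pvLexLe a b) (h2 : pvLexLe b c) : pvLexLe a c := by
  simp [pvLexLe] at *; omega

-- pair-accumulator loop shapes
lemma pv_foldl_pair {K A B : Type} (ks : List K) (f : K → A) (g : K → B) (acc : List A × List B) :
    ks.foldl (fun acc k => (acc.1 ++ [f k], acc.2 ++ [g k])) acc = (acc.1 ++ ks.map f, acc.2 ++ ks.map g) := by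
  induction ks generalizing acc with
  | nil => simp
  | cons k ks ih => simp [ih]

lemma pv_foldl_pair_if {K A B : Type} (ks : List K) (P : K → Prop) [DecidablePred P]
    (f : K → A) (g : K → B) (acc : List A × List B) :
    ks.foldl (fun acc k => if P k then (acc.1 ++ [f k], acc.2 ++ [g k]) else acc) acc
      = (acc.1 ++ (ks.filter (fun k => decide (P k))).map f,
         acc.2 ++ (ks.filter (fun k => decide (P k))).map g) := by
  induction ks generalizing acc with
  | nil => simp
  | cons k ks ih =>
      by_cases h : P k <;> simp [h, ih]

lemma pv_nested {S : Type} (xs ys : List Int) (h : S → Int → Int → S) (s : S) :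
    xs.foldl (fun s x => ys.foldl (fun s y => h s x y) s) s
      = (xs.flatMap (fun x => ys.map (fun y => (x, y)))).foldl (fun s k => h s k.1 k.2) s := by
  induction xs generalizing s with
  | nil => rfl
  | cons x xs ih => simp [List.foldl_append, List.foldl_map, ih]

-- sorted2 with fst/snd keys names the unique lex-sorted rearrangement
lemma pv_insertBy_pairwise (x : Int × Int) (ys : List (Int × Int)) (h : ys.Pairwise pvLexLe) :
    (PySem.List.insertBy pvB x ys).Pairwise pvLexLe := by
  induction ys with
  | nil => simp [PySem.List.insertBy]
  | cons y ys ih =>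
      rw [List.pairwise_cons] at h
      by_cases hb : pvB x y = true
      · rw [PySem.List.insertBy, if_pos hb]
        have hxy : pvLexLe x y := pvLexLt_le x y ((pvB_iff x y).mp hb)
        refine List.Pairwise.cons ?_ (List.Pairwise.cons h.1 h.2)
        intro z hz
        rcases List.mem_cons.mp hz with rfl | hz
        · exact hxy
        · exact pvLexLe_trans x y z hxy (h.1 z hz)
      · rw [PySem.List.insertBy, if_neg hb]
        have hyx : pvLexLe y x := by
          simp [pvB] at hb
          simp [pvLexLe]; omega
        refine List.Pairwise.cons ?_ (ih h.2)
        intro z hz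
        rw [PySem.List.insertBy_mem_iff] at hz
        rcases hz with rfl | hz
        · exact hyx
        · exact h.1 z hz

lemma pv_foldl_insertBy_pairwise (xs acc : List (Int × Int)) (h : acc.Pairwise pvLexLe) :
    (xs.foldl (fun acc x => PySem.List.insertBy pvB x acc) acc).Pairwise pvLexLe := by
  induction xs generalizing acc with
  | nil => exact h
  | cons x xs ih => exact ih _ (pv_insertBy_pairwise x acc h)

lemma pv_sorted2_eq (xs ys : List (Int × Int)) (hperm : ys.Perm xs) (hp : ys.Pairwise pvLexLt) :
    PySem.List.sorted2 xs Prod.fst Prod.snd = ys := by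
  have hS : PySem.List.sorted2 xs Prod.fst Prod.snd
      = xs.foldl (fun acc x => PySem.List.insertBy pvB x acc) [] := by
    simp only [PySem.List.sorted2]
    rfl
  rw [hS]
  have hperm2 : (xs.foldl (fun acc x => PySem.List.insertBy pvB x acc) []).Perm ys := by
    have h1 := PySem.List.foldl_insertBy_perm pvB xs []
    simpa using h1.trans hperm.symm
  have hpw := pv_foldl_insertBy_pairwise xs [] (by simp)
  have hpy : ys.Pairwise pvLexLe := hp.imp (fun h => pvLexLt_le _ _ h)
  exact List.Perm.eq_of_pairwise (fun a b _ _ h1 h2 => pvLexLe_antisymm a b h1 h2) hpw hpy hperm2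

-- grid is strictly lex sorted
lemma pv_flatMap_pairwise (xs ys : List Int) (hxs : xs.Pairwise (· < ·)) (hys : ys.Pairwise (· < ·)) :
    (xs.flatMap (fun x => ys.map (fun y => (x, y)))).Pairwise pvLexLt := by
  induction xs with
  | nil => simp
  | cons x xs ih =>
      rw [List.pairwise_cons] at hxs
      rw [List.flatMap_cons, List.pairwise_append]
      refine ⟨?_, ih hxs.2, ?_⟩
      · refine List.Pairwise.map _ ?_ hys
        intro a b h
        exact Or.inr ⟨rfl, h⟩
      · intro a ha b hb
        simp only [List.mem_map] at ha
        obtain ⟨ya, _, rfl⟩ := ha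
        simp only [List.mem_flatMap, List.mem_map] at hb
        obtain ⟨x', hx', yb, _, rfl⟩ := hb
        exact Or.inl (hxs.1 x' hx')

lemma pv_pyRange_pairwise (w bs : Int) (hbs : 1 ≤ bs) :
    (PySem.List.pyRange 0 w bs).Pairwise (· < ·) := by
  rw [PySem.List.pyRange_of_pos 0 w (by omega)]
  refine List.Pairwise.map _ ?_ List.pairwise_lt_range
  intro a b h
  have : (a : Int) < (b : Int) := by exact_mod_cast h
  nlinarith

-- set-building loop = ofList of the flattened key list
lemma pv_foldl_update {β : Type} (l : List β) (f : β → List (Int × Int)) (s : PySem.Set (Int × Int)) :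
    l.foldl (fun ks b => PySem.Set.update ks (f b)) s = PySem.Set.update s (l.flatMap f) := by
  induction l generalizing s with
  | nil => simp [PySem.Set.update]
  | cons b l ih =>
      simp only [List.foldl_cons, List.flatMap_cons]
      rw [ih]
      simp [PySem.Set.update, List.foldl_append]

lemma pv_blockIndices_bounds (d bs i : Int) (hbs : 1 ≤ bs) (hd : 0 ≤ d) (hi : i ∈ blockIndices d bs) :
    0 ≤ i ∧ i * bs ≤ d := by
  have hbs' : (0:Int) < bs := by omega
  have hq : PySem.Int.floordiv d bs = d / bs := PySem.Int.floordiv_eq_ediv_of_pos hbs'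
  have hr : PySem.Int.mod d bs = d % bs := PySem.Int.mod_eq_emod_of_pos hbs'
  have hdm : bs * (d / bs) + d % bs = d := Int.mul_ediv_add_emod d bs
  have hr0 : 0 ≤ d % bs := Int.emod_nonneg d (by omega)
  have hq0 : 0 ≤ d / bs := Int.ediv_nonneg hd (by omega)
  simp only [blockIndices, hq, hr] at hi
  split_ifs at hi with hc
  · simp only [List.mem_cons, List.not_mem_nil, or_false] at hi
    have e1 : (d / bs - 1) * bs = bs * (d / bs) - bs := by ring
    have e2 : d / bs * bs = bs * (d / bs) := by ring
    rcases hi with rfl | rfl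
    · exact ⟨by omega, by linarith⟩
    · exact ⟨hq0, by linarith⟩
  · simp only [List.mem_cons, List.not_mem_nil, or_false] at hi
    subst hi
    have e2 : d / bs * bs = bs * (d / bs) := by ring
    exact ⟨hq0, by linarith⟩

-- arithmetic heart: candidate block starts along one axis
lemma pv_axis (bs d w x : Int) (hbs : 1 ≤ bs) (hd0 : 0 ≤ d) (hdw : d < w) :
    (x ∈ PySem.List.pyRange 0 w bs ∧ x ≤ d ∧ d ≤ x + bs) ↔ ∃ i, i ∈ blockIndices d bs ∧ x = i * bs := by
  have hbs' : (0:Int) < bs := by omega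
  have hq : PySem.Int.floordiv d bs = d / bs := PySem.Int.floordiv_eq_ediv_of_pos hbs'
  have hr : PySem.Int.mod d bs = d % bs := PySem.Int.mod_eq_emod_of_pos hbs'
  have hdm : bs * (d / bs) + d % bs = d := Int.mul_ediv_add_emod d bs
  have hr0 : 0 ≤ d % bs := Int.emod_nonneg d (by omega)
  have hrlt : d % bs < bs := Int.emod_lt_of_pos d hbs'
  have hq0 : 0 ≤ d / bs := Int.ediv_nonneg hd0 (by omega)
  rw [PySem.List.mem_pyRange_iff_of_pos hbs']
  constructor
  · rintro ⟨⟨hx0, hxw, ⟨j, hj⟩⟩, h1, h2⟩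
    rw [sub_zero] at hj
    have e1 : bs * (d / bs + 1) = bs * (d / bs) + bs := by ring
    have hA : bs * j < bs * (d / bs + 1) := by linarith
    have hle : j ≤ d / bs := by
      have := lt_of_mul_lt_mul_left hA (by omega : (0:Int) ≤ bs); omega
    have e2 : bs * (j + 1) = bs * j + bs := by ring
    have hB : bs * (d / bs) ≤ bs * (j + 1) := by linarith
    have hge : d / bs ≤ j + 1 := le_of_mul_le_mul_left hB hbs'
    have hj0 : 0 ≤ j := by
      by_contra hneg
      push_neg at hneg
      have : bs * j ≤ bs * (-1) := by
        apply mul_le_mul_of_nonneg_left (by omega) (by omega)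
      linarith
    refine ⟨j, ?_, by rw [hj, mul_comm]⟩
    simp only [blockIndices, hq, hr]
    split_ifs with hc
    · simp only [List.mem_cons, List.not_mem_nil, or_false]
      omega
    · simp only [List.mem_cons, List.not_mem_nil, or_false]
      by_contra hne
      have hj_eq : j = d / bs - 1 := by omega
      have e3 : bs * (d / bs - 1) = bs * (d / bs) - bs := by ring
      have hbj : bs * j = bs * (d / bs) - bs := by rw [hj_eq]; exact e3
      have hrle : d % bs ≤ 0 := by linarith
      exact hc ⟨by omega, by omega⟩
  · rintro ⟨i, hi, rfl⟩
    have hb := pv_blockIndices_bounds d bs i hbs hd0 hi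
    refine ⟨⟨mul_nonneg hb.1 (by omega), by linarith [hb.2], ⟨i, by ring⟩⟩, hb.2, ?_⟩
    simp only [blockIndices, hq, hr] at hi
    split_ifs at hi with hc
    · simp only [List.mem_cons, List.not_mem_nil, or_false] at hi
      have hrz := hc.1
      rcases hi with rfl | rfl
      · have e : (d / bs - 1) * bs + bs = bs * (d / bs) := by ring
        linarith
      · have e : d / bs * bs = bs * (d / bs) := by ring
        linarith
    · simp only [List.mem_cons, List.not_mem_nil, or_false] at hi
      subst hi
      have e : d / bs * bs = bs * (d / bs) := by ring
      linarith

-- ===== VERDICT (by name: the statement is the Claim_ definition above) =====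
lemma pv_foldl_filter {α : Type} (P : α → Prop) [DecidablePred P] (l acc : List α) :
    l.foldl (fun acc x => if P x then acc ++ [x] else acc) acc = acc ++ l.filter (fun x => decide (P x)) := by
  induction l generalizing acc with
  | nil => simp
  | cons x l ih => by_cases h : P x <;> simp [h, ih]

-- the heart: A's surviving grid blocks are exactly B's sorted hashed keys, scaled by bs
lemma pv_core (L : List (List Int)) (bs mx Mx my My : Int) (hbs : 1 ≤ bs)
    (hxlo : ∀ p ∈ L, mx ≤ PySem.List.pyGetD p 0 0) (hxhi : ∀ p ∈ L, PySem.List.pyGetD p 0 0 ≤ Mx)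
    (hylo : ∀ p ∈ L, my ≤ PySem.List.pyGetD p 1 0) (hyhi : ∀ p ∈ L, PySem.List.pyGetD p 1 0 ≤ My) :
    (((PySem.List.pyRange 0 (Mx - mx + 1) bs).flatMap
        (fun x => (PySem.List.pyRange 0 (My - my + 1) bs).map (fun y => (x, y)))).filter
      (fun k => decide ((L.filter (fun p => decide ((min (mx + k.1) Mx ≤ PySem.List.pyGetD p 0 0 ∧
          PySem.List.pyGetD p 0 0 ≤ min (min (mx + k.1) Mx + bs) Mx) ∧
          min (my + k.2) My ≤ PySem.List.pyGetD p 1 0 ∧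
          PySem.List.pyGetD p 1 0 ≤ min (min (my + k.2) My + bs) My))) ≠ [])))
      = (PySem.List.sorted2 (PySem.Set.ofList (L.flatMap
          (fun p => (blockIndices (PySem.List.pyGetD p 0 0 - mx) bs).flatMap
            (fun ix => (blockIndices (PySem.List.pyGetD p 1 0 - my) bs).map (fun iy => (ix, iy))))))
          Prod.fst Prod.snd).map (fun k => (k.1 * bs, k.2 * bs)) := by
  have hbs0 : bs ≠ 0 := by omega
  -- abbreviations
  set RX := PySem.List.pyRange 0 (Mx - mx + 1) bs with hRX
  set RY := PySem.List.pyRange 0 (My - my + 1) bs with hRY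
  set G := RX.flatMap (fun x => RY.map (fun y => (x, y))) with hG
  set KL := L.flatMap (fun p => (blockIndices (PySem.List.pyGetD p 0 0 - mx) bs).flatMap
      (fun ix => (blockIndices (PySem.List.pyGetD p 1 0 - my) bs).map (fun iy => (ix, iy)))) with hKL
  set PT := fun k : Int × Int => decide ((L.filter (fun p => decide ((min (mx + k.1) Mx ≤ PySem.List.pyGetD p 0 0 ∧
      PySem.List.pyGetD p 0 0 ≤ min (min (mx + k.1) Mx + bs) Mx) ∧
      min (my + k.2) My ≤ PySem.List.pyGetD p 1 0 ∧
      PySem.List.pyGetD p 1 0 ≤ min (min (my + k.2) My + bs) My))) ≠ []) with hPT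
  set T := G.filter PT with hT
  set ψ := fun g : Int × Int => (g.1 / bs, g.2 / bs) with hψ
  -- membership in G
  have hGmem : ∀ g ∈ G, (0 ≤ g.1 ∧ g.1 ≤ Mx - mx ∧ bs ∣ g.1) ∧ (0 ≤ g.2 ∧ g.2 ≤ My - my ∧ bs ∣ g.2) := by
    intro g hg
    rw [hG, List.mem_flatMap] at hg
    obtain ⟨x, hx, hg⟩ := hg
    rw [List.mem_map] at hg
    obtain ⟨y, hy, rfl⟩ := hg
    rw [hRX, PySem.List.mem_pyRange_iff_of_pos (by omega)] at hx
    rw [hRY, PySem.List.mem_pyRange_iff_of_pos (by omega)] at hy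
    rw [sub_zero] at hx hy
    exact ⟨⟨hx.1, by omega, hx.2.2⟩, ⟨hy.1, by omega, hy.2.2⟩⟩
  have hTsub : ∀ g ∈ T, g ∈ G := fun g hg => List.mem_of_mem_filter hg
  -- the per-axis condition, rephrased
  have hcond : ∀ (x y : Int), 0 ≤ x → x ≤ Mx - mx → 0 ≤ y → y ≤ My - my → ∀ p ∈ L,
      (((min (mx + x) Mx ≤ PySem.List.pyGetD p 0 0 ∧
          PySem.List.pyGetD p 0 0 ≤ min (min (mx + x) Mx + bs) Mx) ∧
          min (my + y) My ≤ PySem.List.pyGetD p 1 0 ∧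
          PySem.List.pyGetD p 1 0 ≤ min (min (my + y) My + bs) My)) ↔
      (x ≤ PySem.List.pyGetD p 0 0 - mx ∧ PySem.List.pyGetD p 0 0 - mx ≤ x + bs ∧
       y ≤ PySem.List.pyGetD p 1 0 - my ∧ PySem.List.pyGetD p 1 0 - my ≤ y + bs) := by
    intro x y hx0 hx1 hy0 hy1 p hp
    rw [min_eq_left (by omega : mx + x ≤ Mx), min_eq_left (by omega : my + y ≤ My)]
    have h1 := hxhi p hp
    have h2 := hyhi p hp
    simp only [le_min_iff]
    constructor
    · rintro ⟨⟨a1, a2⟩, a3, a4⟩; omega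
    · rintro ⟨a1, a2, a3, a4⟩; exact ⟨⟨by omega, by omega, h1⟩, by omega, by omega, h2⟩
  have hGmem2 : ∀ g ∈ G, g.1 ∈ RX ∧ g.2 ∈ RY := by
    intro g hg
    rw [hG, List.mem_flatMap] at hg
    obtain ⟨x, hx, hgg⟩ := hg
    rw [List.mem_map] at hgg
    obtain ⟨y, hy, rfl⟩ := hgg
    exact ⟨hx, hy⟩
  -- membership transfer: T.map ψ has the same members as KL
  have hmem_iff : ∀ a : Int × Int, a ∈ T.map ψ ↔ a ∈ KL := by
    intro a
    constructor
    · rintro haT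
      rw [List.mem_map] at haT
      obtain ⟨g, hgT, rfl⟩ := haT
      have hgG := hTsub g hgT
      obtain ⟨⟨hx0, hx1, hxd⟩, hy0, hy1, hyd⟩ := hGmem g hgG
      obtain ⟨hgRX, hgRY⟩ := hGmem2 g hgG
      rw [hT, List.mem_filter, hPT] at hgT
      have hPg := of_decide_eq_true hgT.2
      rw [← List.isEmpty_eq_false_iff, List.isEmpty_eq_false_iff_exists_mem] at hPg
      obtain ⟨p, hpf⟩ := hPg
      rw [List.mem_filter] at hpf
      obtain ⟨hp, hc⟩ := hpf
      have hcc := of_decide_eq_true hc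
      rw [hcond g.1 g.2 hx0 hx1 hy0 hy1 p hp] at hcc
      have hdx0 : 0 ≤ PySem.List.pyGetD p 0 0 - mx := by have := hxlo p hp; omega
      have hdxw : PySem.List.pyGetD p 0 0 - mx < Mx - mx + 1 := by have := hxhi p hp; omega
      have hdy0 : 0 ≤ PySem.List.pyGetD p 1 0 - my := by have := hylo p hp; omega
      have hdyw : PySem.List.pyGetD p 1 0 - my < My - my + 1 := by have := hyhi p hp; omega
      obtain ⟨i, hi, hgx⟩ := (pv_axis bs (PySem.List.pyGetD p 0 0 - mx) (Mx - mx + 1) g.1 hbs hdx0 hdxw).mp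
        ⟨hgRX, hcc.1, hcc.2.1⟩
      obtain ⟨j, hj, hgy⟩ := (pv_axis bs (PySem.List.pyGetD p 1 0 - my) (My - my + 1) g.2 hbs hdy0 hdyw).mp
        ⟨hgRY, hcc.2.2.1, hcc.2.2.2⟩
      have hψg : ψ g = (i, j) := by
        rw [hψ]
        simp only []
        rw [hgx, hgy, Int.mul_ediv_cancel i hbs0, Int.mul_ediv_cancel j hbs0]
      rw [hψg, hKL, List.mem_flatMap]
      exact ⟨p, hp, by rw [List.mem_flatMap]; exact ⟨i, hi, by rw [List.mem_map]; exact ⟨j, hj, rfl⟩⟩⟩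
    · intro haKL
      rw [hKL, List.mem_flatMap] at haKL
      obtain ⟨p, hp, ha⟩ := haKL
      rw [List.mem_flatMap] at ha
      obtain ⟨i, hi, ha⟩ := ha
      rw [List.mem_map] at ha
      obtain ⟨j, hj, rfl⟩ := ha
      have hdx0 : 0 ≤ PySem.List.pyGetD p 0 0 - mx := by have := hxlo p hp; omega
      have hdxw : PySem.List.pyGetD p 0 0 - mx < Mx - mx + 1 := by have := hxhi p hp; omega
      have hdy0 : 0 ≤ PySem.List.pyGetD p 1 0 - my := by have := hylo p hp; omega
      have hdyw : PySem.List.pyGetD p 1 0 - my < My - my + 1 := by have := hyhi p hp; omega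
      obtain ⟨hxmem, hx1, hx2⟩ := (pv_axis bs (PySem.List.pyGetD p 0 0 - mx) (Mx - mx + 1) (i * bs) hbs hdx0 hdxw).mpr ⟨i, hi, rfl⟩
      obtain ⟨hymem, hy1, hy2⟩ := (pv_axis bs (PySem.List.pyGetD p 1 0 - my) (My - my + 1) (j * bs) hbs hdy0 hdyw).mpr ⟨j, hj, rfl⟩
      have hgG : ((i * bs, j * bs) : Int × Int) ∈ G := by
        rw [hG, List.mem_flatMap]
        exact ⟨i * bs, hxmem, by rw [List.mem_map]; exact ⟨j * bs, hymem, rfl⟩⟩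
      obtain ⟨⟨hgx0, hgx1, _⟩, hgy0, hgy1, _⟩ := hGmem _ hgG
      have hcA := (hcond (i * bs) (j * bs) hgx0 hgx1 hgy0 hgy1 p hp).mpr ⟨hx1, hx2, hy1, hy2⟩
      rw [List.mem_map]
      refine ⟨(i * bs, j * bs), ?_, ?_⟩
      · rw [hT, List.mem_filter]
        refine ⟨hgG, ?_⟩
        rw [hPT]
        apply decide_eq_true
        apply List.ne_nil_of_mem (a := p)
        rw [List.mem_filter]
        exact ⟨hp, decide_eq_true hcA⟩
      · rw [hψ]
        simp only []
        rw [Int.mul_ediv_cancel i hbs0, Int.mul_ediv_cancel j hbs0]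
  -- both sides are strictly lex-sorted with the same members
  have hGpw : G.Pairwise pvLexLt := by
    rw [hG]
    exact pv_flatMap_pairwise _ _ (by rw [hRX]; exact pv_pyRange_pairwise _ _ hbs)
      (by rw [hRY]; exact pv_pyRange_pairwise _ _ hbs)
  have hTpw : T.Pairwise pvLexLt := by rw [hT]; exact hGpw.filter _
  have hTψpw : (T.map ψ).Pairwise pvLexLt := by
    rw [List.pairwise_map]
    refine List.Pairwise.imp_of_mem ?_ hTpw
    intro a b ha hb hab
    obtain ⟨⟨_, _, ia, hia⟩, _, _, ja, hja⟩ := hGmem a (hTsub a ha)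
    obtain ⟨⟨_, _, ib, hib⟩, _, _, jb, hjb⟩ := hGmem b (hTsub b hb)
    rw [hψ]
    rcases hab with h | ⟨h1, h2⟩
    · left
      simp only []
      rw [hia, hib, Int.mul_ediv_cancel_left ia hbs0, Int.mul_ediv_cancel_left ib hbs0]
      rw [hia, hib] at h
      exact lt_of_mul_lt_mul_left h (by omega)
    · right
      constructor
      · simp only []
        rw [h1]
      · simp only []
        rw [hja, hjb, Int.mul_ediv_cancel_left ja hbs0, Int.mul_ediv_cancel_left jb hbs0]
        rw [hja, hjb] at h2
        exact lt_of_mul_lt_mul_left h2 (by omega)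
  have hnd1 : (T.map ψ).Nodup := by
    refine hTψpw.imp ?_
    intro a b h
    rintro rfl
    rcases h with h | ⟨_, h⟩ <;> exact lt_irrefl _ h
  have hperm : (T.map ψ).Perm (PySem.Set.ofList KL) :=
    List.perm_of_nodup_nodup_toFinset_eq hnd1 (PySem.Set.nodup_ofList KL) (by
      ext a
      simp only [List.mem_toFinset]
      rw [hmem_iff a, PySem.Set.mem_ofList])
  have hSK : PySem.List.sorted2 (PySem.Set.ofList KL) Prod.fst Prod.snd = T.map ψ :=
    pv_sorted2_eq _ _ hperm hTψpw
  rw [hSK, List.map_map]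
  have hid : List.map ((fun k : Int × Int => (k.1 * bs, k.2 * bs)) ∘ ψ) T = List.map id T := by
    apply List.map_congr_left
    intro a ha
    obtain ⟨⟨_, _, hxd⟩, _, _, hyd⟩ := hGmem a (hTsub a ha)
    simp only [Function.comp, hψ, id]
    rw [Int.ediv_mul_cancel hxd, Int.ediv_mul_cancel hyd]
  rw [hid, List.map_id]

theorem create_block_list_spec : Claim_equal_create_block_list := by
  intro L bs _ hpre
  obtain ⟨hne, hlen, hbs⟩ := hpre
  unfold Spec_create_block_list
  obtain ⟨mx, hmx⟩ : ∃ m, PySem.List.min? (L.map (fun i => PySem.List.pyGetD i 0 0)) (fun v => v) = some m := by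
    cases h : PySem.List.min? (L.map (fun i => PySem.List.pyGetD i 0 0)) (fun v => v) with
    | none =>
        rw [PySem.List.min?_eq_none_iff, List.map_eq_nil_iff] at h
        exact absurd h hne
    | some m => exact ⟨m, rfl⟩
  obtain ⟨Mx, hMx⟩ : ∃ m, PySem.List.max? (L.map (fun i => PySem.List.pyGetD i 0 0)) (fun v => v) = some m := by
    cases h : PySem.List.max? (L.map (fun i => PySem.List.pyGetD i 0 0)) (fun v => v) with
    | none =>
        rw [PySem.List.max?_eq_none_iff, List.map_eq_nil_iff] at h
        exact absurd h hne
    | some m => exact ⟨m, rfl⟩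
  obtain ⟨my, hmy⟩ : ∃ m, PySem.List.min? (L.map (fun i => PySem.List.pyGetD i 1 0)) (fun v => v) = some m := by
    cases h : PySem.List.min? (L.map (fun i => PySem.List.pyGetD i 1 0)) (fun v => v) with
    | none =>
        rw [PySem.List.min?_eq_none_iff, List.map_eq_nil_iff] at h
        exact absurd h hne
    | some m => exact ⟨m, rfl⟩
  obtain ⟨My, hMy⟩ : ∃ m, PySem.List.max? (L.map (fun i => PySem.List.pyGetD i 1 0)) (fun v => v) = some m := by
    cases h : PySem.List.max? (L.map (fun i => PySem.List.pyGetD i 1 0)) (fun v => v) with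
    | none =>
        rw [PySem.List.max?_eq_none_iff, List.map_eq_nil_iff] at h
        exact absurd h hne
    | some m => exact ⟨m, rfl⟩
  have hxlo : ∀ p ∈ L, mx ≤ PySem.List.pyGetD p 0 0 := fun p hp =>
    PySem.List.min?_isMin hmx _ (List.mem_map_of_mem hp)
  have hxhi : ∀ p ∈ L, PySem.List.pyGetD p 0 0 ≤ Mx := fun p hp =>
    PySem.List.max?_isMax hMx _ (List.mem_map_of_mem hp)
  have hylo : ∀ p ∈ L, my ≤ PySem.List.pyGetD p 1 0 := fun p hp =>
    PySem.List.min?_isMin hmy _ (List.mem_map_of_mem hp)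
  have hyhi : ∀ p ∈ L, PySem.List.pyGetD p 1 0 ≤ My := fun p hp =>
    PySem.List.max?_isMax hMy _ (List.mem_map_of_mem hp)
  obtain ⟨p0, hp0⟩ := List.exists_mem_of_ne_nil L hne
  have hmmx : mx ≤ Mx := le_trans (hxlo p0 hp0) (hxhi p0 hp0)
  have hmmy : my ≤ My := le_trans (hylo p0 hp0) (hyhi p0 hp0)
  unfold create_block_list create_block_list_alt
  simp only [hmx, hMx, hmy, hMy, Option.getD_some]
  simp only [pv_foldl_filter, List.nil_append]
  rw [pv_nested]
  rw [pv_foldl_pair_if]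
  simp only [← PySem.Set.update_map_eq_foldl_add]
  simp only [pv_foldl_update]
  rw [show (PySem.Set.empty : PySem.Set (Int × Int)) = [] from rfl, PySem.Set.update_nil_left]
  rw [pv_foldl_pair]
  simp only [List.nil_append]
  rw [pv_core L bs mx Mx my My hbs hxlo hxhi hylo hyhi]
  rw [List.map_map, List.map_map]
  have hSKb : ∀ k ∈ PySem.List.sorted2 (PySem.Set.ofList (L.flatMap
      (fun p => (blockIndices (PySem.List.pyGetD p 0 0 - mx) bs).flatMap
        (fun ix => (blockIndices (PySem.List.pyGetD p 1 0 - my) bs).map (fun iy => (ix, iy))))))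
      Prod.fst Prod.snd, 0 ≤ k.1 ∧ k.1 * bs ≤ Mx - mx ∧ 0 ≤ k.2 ∧ k.2 * bs ≤ My - my := by
    intro k hk
    rw [List.Perm.mem_iff (PySem.List.sorted2_perm _ _ _ _), PySem.Set.mem_ofList,
      List.mem_flatMap] at hk
    obtain ⟨p, hp, hk⟩ := hk
    rw [List.mem_flatMap] at hk
    obtain ⟨i, hi, hk⟩ := hk
    rw [List.mem_map] at hk
    obtain ⟨j, hj, rfl⟩ := hk
    have hdx0 : 0 ≤ PySem.List.pyGetD p 0 0 - mx := by have := hxlo p hp; omega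
    have hdy0 : 0 ≤ PySem.List.pyGetD p 1 0 - my := by have := hylo p hp; omega
    obtain ⟨hx1, hx2⟩ := pv_blockIndices_bounds _ _ _ hbs hdx0 hi
    obtain ⟨hy1, hy2⟩ := pv_blockIndices_bounds _ _ _ hbs hdy0 hj
    have := hxhi p hp
    have := hyhi p hp
    exact ⟨hx1, by simp only [show ((i, j) : Int × Int).1 = i from rfl]; omega,
           hy1, by simp only [show ((i, j) : Int × Int).2 = j from rfl]; omega⟩
  rw [Prod.mk.injEq]
  constructor
  · apply List.map_congr_left
    intro k hk
    obtain ⟨h1, h2, h3, h4⟩ := hSKb k hk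
    simp only [Function.comp]
    rw [min_eq_left (by omega : mx + k.1 * bs ≤ Mx), min_eq_left (by omega : my + k.2 * bs ≤ My)]
    simp
  · apply List.map_congr_left
    intro k hk
    obtain ⟨h1, h2, h3, h4⟩ := hSKb k hk
    simp only [Function.comp]
    rw [min_eq_left (by omega : mx + k.1 * bs ≤ Mx), min_eq_left (by omega : my + k.2 * bs ≤ My)]
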